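-- pv_equiv track=rewrite | github.com/chtapodi/school | csc321/researchProject/localized_regression.py | grid_gen
-- ===== SOURCE A (Python) =====
-- def grid_gen(side_length) :
-- 	grid=[0]*side_length
-- 	for row_index in range(side_length) :
-- 		row=[0]*side_length
-- 		for col_index in range(side_length) :
-- 			row[col_index]=col_index*side_length+(row_index)
-- 		grid[row_index]=row
-- 	return grid
-- ===== SOURCE B (Python) =====
-- def grid_gen(side_length):
--     n = side_length
--     # Build the COLUMNS of the target grid (column c is the consecutive block
--     # c*n .. c*n+n-1) and transpose them: row r picks the next element of
--     # every column iterator, i.e. c*n+r.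
--     columns = [iter(range(c * n, c * n + n)) for c in range(n)]
--     grid = []
--     for _ in range(n):
--         grid.append([next(col) for col in columns])
--     return grid
-- ===== Notes on version B (the rewrite author's own statement) =====
-- stated objective: alternative
-- what changed: Instead of filling each row cell by cell with the formula col*n+row in a double loop, B constructs the grid's COLUMNS as consecutive blocks range(c*n, c*n+n) and transposes them, each row taking the next element of every column iterator.
import Mathlib
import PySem

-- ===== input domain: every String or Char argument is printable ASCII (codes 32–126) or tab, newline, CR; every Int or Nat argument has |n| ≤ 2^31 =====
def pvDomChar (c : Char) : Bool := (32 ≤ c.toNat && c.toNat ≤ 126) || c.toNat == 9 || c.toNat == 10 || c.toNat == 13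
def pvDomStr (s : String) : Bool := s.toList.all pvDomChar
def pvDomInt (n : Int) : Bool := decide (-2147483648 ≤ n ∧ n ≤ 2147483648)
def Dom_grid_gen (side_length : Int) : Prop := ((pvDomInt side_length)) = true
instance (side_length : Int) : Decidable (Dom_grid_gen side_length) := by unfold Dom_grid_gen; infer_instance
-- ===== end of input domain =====

-- B builds the grid's columns as consecutive blocks range(c*n, c*n+n) and transposes
-- them, each row consuming one element of every column iterator — instead of A's
-- double loop writing col*n+row into each cell (objective: alternative construction).

-- ===== PORT A =====
def grid_gen (side_length : Int) : List (List Int) :=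
  let grid : List (List Int) := List.replicate side_length.toNat []  -- [0]*n, placeholders overwritten by rows
  (PySem.List.pyRange 0 side_length 1).foldl (fun grid row_index =>
    let row : List Int := List.replicate side_length.toNat 0
    let row := (PySem.List.pyRange 0 side_length 1).foldl (fun row col_index =>
      row.set col_index.toNat (col_index * side_length + row_index)) row
    grid.set row_index.toNat row) grid

-- ===== PORT B =====
-- An iterator over a range is its list of remaining elements; next(col) reads the head
-- and advances (tail).  next never hits an exhausted column (each column holds n
-- elements and the loop runs n rounds), so headD's default is never consulted.
def grid_gen_alt (side_length : Int) : List (List Int) :=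
  let n := side_length
  let columns := (PySem.List.pyRange 0 n 1).map (fun c => PySem.List.pyRange (c * n) (c * n + n) 1)
  ((PySem.List.pyRange 0 n 1).foldl
    (fun (p : List (List Int) × List (List Int)) _ =>
      (p.1 ++ [p.2.map (fun col => col.headD 0)], p.2.map List.tail))
    ([], columns)).1

-- ===== PRECONDITION & SPEC =====
def Spec_grid_gen (side_length : Int) (out : List (List Int)) : Prop := out = grid_gen_alt side_length
instance (side_length : Int) (out : List (List Int)) : Decidable (Spec_grid_gen side_length out) := by unfold Spec_grid_gen; infer_instance

-- ===== CLAIM (what is proved, stated in full; the proofs are below) =====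
def Claim_equal_grid_gen : Prop := ∀ (side_length : Int), Dom_grid_gen side_length → Spec_grid_gen side_length (grid_gen side_length)

-- ===== LEMMAS AND PROOFS =====

-- A's loop pattern: overwrite index i with f i, for i over range(0, m), on a list of length ≥ m.
theorem pv_foldl_set_nat {α : Type} (f : Int → α) (m : Nat) :
    ∀ (init : List α), m ≤ init.length →
      (PySem.List.pyRange 0 (m : Int) 1).foldl (fun acc i => acc.set i.toNat (f i)) init
        = (List.range m).map (fun k => f (Int.ofNat k)) ++ init.drop m := by
  induction m with
  | zero => intro init _; simp [PySem.List.pyRange_one_eq_nil]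
  | succ m ih =>
    intro init hlen
    have hsplit : PySem.List.pyRange 0 ((m + 1 : Nat) : Int) 1
        = PySem.List.pyRange 0 (m : Int) 1 ++ [(m : Int)] := by
      have := PySem.List.pyRange_one_succ_right (a := 0) (b := (m : Int)) (by positivity)
      simpa using this
    rw [hsplit, List.foldl_append, ih init (by omega)]
    have hmlt : m < init.length := by omega
    have hdrop : init.drop m = init[m] :: init.drop (m + 1) :=
      List.drop_eq_getElem_cons hmlt
    simp only [List.foldl_cons, List.foldl_nil, Int.toNat_natCast]
    rw [List.set_append_right _ _ (by simp), hdrop]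
    have hl : (List.map (fun k : Nat => f (Int.ofNat k)) (List.range m)).length = m := by simp
    rw [hl, Nat.sub_self, List.set_cons_zero, List.range_succ]
    simp

theorem pv_foldl_set {α : Type} (f : Int → α) (n : Int) (hn : 0 ≤ n)
    (init : List α) (hlen : n.toNat ≤ init.length) :
    (PySem.List.pyRange 0 n 1).foldl (fun acc i => acc.set i.toNat (f i)) init
      = (List.range n.toNat).map (fun k => f (Int.ofNat k)) ++ init.drop n.toNat := by
  obtain ⟨m, rfl⟩ : ∃ m : Nat, n = (m : Int) := ⟨n.toNat, (Int.toNat_of_nonneg hn).symm⟩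
  simpa using pv_foldl_set_nat f m init (by simpa using hlen)

-- A as a closed form: row r is the map over columns of c*n+r.
theorem pv_grid_gen_closed (n : Int) (hn : 0 ≤ n) :
    grid_gen n = (List.range n.toNat).map (fun r : Nat =>
      (List.range n.toNat).map (fun c : Nat => Int.ofNat c * n + Int.ofNat r)) := by
  unfold grid_gen
  dsimp only
  rw [pv_foldl_set
      (fun i => (PySem.List.pyRange 0 n 1).foldl
        (fun row col_index => row.set col_index.toNat (col_index * n + i))
        (List.replicate n.toNat (0 : Int)))
      n hn (List.replicate n.toNat []) (by simp)]
  simp only [List.drop_replicate, Nat.sub_self, List.replicate_zero, List.append_nil]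
  refine List.map_congr_left (fun r _ => ?_)
  rw [pv_foldl_set (fun i => i * n + (Int.ofNat r)) n hn
      (List.replicate n.toNat 0) (by simp)]
  simp [Int.ofNat_eq_natCast]

-- A foldl that ignores the list's elements only counts them.
theorem pv_foldl_const {α β : Type} (g : β → β) (xs : List α) (init : β) :
    xs.foldl (fun b _ => g b) init = (List.range xs.length).foldl (fun b _ => g b) init := by
  induction xs generalizing init with
  | nil => rfl
  | cons x xs ih =>
    simp only [List.foldl_cons, List.length_cons, List.range_succ_eq_map,
      List.foldl_map]
    exact ih (g init)

-- B's transpose loop: m rounds of (emit heads, advance tails) over a family of columns.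
theorem pv_rounds (m : Nat) :
    ∀ (cols : List (List Int)) (acc : List (List Int)),
      ((List.range m).foldl
        (fun (p : List (List Int) × List (List Int)) _ =>
          (p.1 ++ [p.2.map (fun col => col.headD 0)], p.2.map List.tail))
        (acc, cols)).1
      = acc ++ (List.range m).map (fun r => cols.map (fun l => l.getD r 0)) := by
  induction m with
  | zero => intro cols acc; simp
  | succ m ih =>
    intro cols acc
    rw [List.range_succ_eq_map]
    simp only [List.foldl_cons, List.foldl_map, List.map_cons, List.map_map]
    rw [ih (cols.map List.tail) (acc ++ [cols.map (fun col => col.headD 0)])]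
    have hh : ∀ l : List Int, l.headD 0 = l.getD 0 0 := fun l => by cases l <;> rfl
    have ht : ∀ (l : List Int) (r : Nat), l.tail.getD r 0 = l.getD (r + 1) 0 := fun l r => by
      cases l <;> rfl
    simp only [List.map_map, Function.comp_def, hh, ht, List.append_assoc,
      List.singleton_append]

theorem grid_gen_eq_alt (n : Int) : grid_gen n = grid_gen_alt n := by
  by_cases hle : n ≤ 0
  · have h0 : PySem.List.pyRange 0 n 1 = [] := PySem.List.pyRange_one_eq_nil hle
    simp [grid_gen, grid_gen_alt, h0, Int.toNat_of_nonpos hle]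
  · have hpos : 0 < n := by omega
    rw [pv_grid_gen_closed n hpos.le]
    unfold grid_gen_alt
    dsimp only
    have hcols : (PySem.List.pyRange 0 n 1).map
          (fun c => PySem.List.pyRange (c * n) (c * n + n) 1)
        = (List.range n.toNat).map
          (fun c : Nat => (List.range n.toNat).map (fun k : Nat => Int.ofNat c * n + Int.ofNat k)) := by
      rw [PySem.List.pyRange_one]
      simp only [Int.sub_zero, List.map_map]
      refine List.map_congr_left (fun c _ => ?_)
      simp only [Function.comp_apply]
      rw [PySem.List.pyRange_one]
      simp [Int.ofNat_eq_natCast]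
    rw [hcols, pv_foldl_const
      (fun p : List (List Int) × List (List Int) =>
        (p.1 ++ [p.2.map (fun col => col.headD 0)], p.2.map List.tail))]
    rw [PySem.List.length_pyRange_one]
    simp only [Int.sub_zero]
    rw [pv_rounds n.toNat _ []]
    simp only [List.nil_append]
    refine List.map_congr_left (fun r hr => ?_)
    have hrlt : r < n.toNat := List.mem_range.mp hr
    simp only [List.map_map]
    refine List.map_congr_left (fun c _ => ?_)
    simp only [Function.comp_apply]
    rw [List.getD_eq_getElem?_getD, List.getElem?_map,
        List.getElem?_range hrlt]
    rfl

-- ===== VERDICT (by name: the statement is the Claim_ definition above) =====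
theorem grid_gen_spec : Claim_equal_grid_gen := by
  intro n _
  unfold Spec_grid_gen
  exact grid_gen_eq_alt n
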